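-- pv_equiv track=rewrite | github.com/Pasin0931/pc_code | c5/5.py | find_sum_and_num_factors
-- ===== SOURCE A (Python) =====
-- def find_sum_and_num_factors(n):
--     res = []
--     count = 0
--
--     for i in range(1, n+1):
--         if n % i == 0:
--             res.append(i)
--             count += 1
--     return sum(res), count
-- ===== SOURCE B (Python) =====
-- def find_sum_and_num_factors(n):
--     # O(sqrt(n)): enumerate divisor pairs (i, n // i) up to sqrt(n)
--     s = 0
--     count = 0
--     i = 1
--     while i * i <= n:
--         if n % i == 0:
--             s += i
--             count += 1
--             j = n // i
--             if j != i:
--                 s += j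
--                 count += 1
--         i += 1
--     return s, count
-- ===== Notes on version B (the rewrite author's own statement) =====
-- stated objective: faster
-- what changed: Instead of scanning every i in 1..n and collecting divisors in a list, B walks i only up to sqrt(n) and adds each divisor pair (i, n//i) to running sum/count accumulators.
import Mathlib
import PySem

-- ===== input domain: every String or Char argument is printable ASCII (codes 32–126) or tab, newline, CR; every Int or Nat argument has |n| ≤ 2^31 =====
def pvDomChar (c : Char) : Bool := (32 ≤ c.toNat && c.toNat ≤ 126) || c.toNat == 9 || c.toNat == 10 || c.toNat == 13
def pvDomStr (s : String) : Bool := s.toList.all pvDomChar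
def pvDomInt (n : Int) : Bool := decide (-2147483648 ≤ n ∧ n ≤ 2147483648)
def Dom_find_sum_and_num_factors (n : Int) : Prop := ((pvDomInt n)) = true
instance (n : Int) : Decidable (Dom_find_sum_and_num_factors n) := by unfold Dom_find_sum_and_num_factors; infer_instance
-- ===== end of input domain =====

-- B replaces A's O(n) scan of 1..n with an O(sqrt(n)) walk over divisor pairs (i, n//i).


-- ===== PORT A =====
def find_sum_and_num_factors (n : Int) : Int × Int :=
  let st := (PySem.List.pyRange 1 (n + 1) 1).foldl
    (fun (st : List Int × Int) i =>
      if PySem.Int.mod n i == 0 then (st.1 ++ [i], st.2 + 1) else st)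
    ([], 0)
  (st.1.sum, st.2)

-- ===== PORT B =====
-- the while-loop of B: i counts up while i*i <= n, accumulating (s, count)
def pvLoopB (n i s c : Int) : Int × Int :=
  if h : i * i ≤ n then
    let sc :=
      if PySem.Int.mod n i == 0 then
        let s1 := s + i
        let c1 := c + 1
        let j := PySem.Int.floordiv n i
        if j ≠ i then (s1 + j, c1 + 1) else (s1, c1)
      else (s, c)
    pvLoopB n (i + 1) sc.1 sc.2
  else (s, c)
  termination_by (n + 1 - i).toNat
  decreasing_by
    have hi : i ≤ n := by nlinarith [sq_nonneg i, sq_nonneg (i - 1)]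
    omega

def find_sum_and_num_factors_alt (n : Int) : Int × Int :=
  pvLoopB n 1 0 0

-- ===== PRECONDITION & SPEC =====
def Spec_find_sum_and_num_factors (n : Int) (out : Int × Int) : Prop := out = find_sum_and_num_factors_alt n
instance (n : Int) (out : Int × Int) : Decidable (Spec_find_sum_and_num_factors n out) := by unfold Spec_find_sum_and_num_factors; infer_instance

-- ===== CLAIM (what is proved, stated in full; the proofs are below) =====
def Claim_equal_find_sum_and_num_factors : Prop := ∀ (n : Int), Dom_find_sum_and_num_factors n → Spec_find_sum_and_num_factors n (find_sum_and_num_factors n)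

-- ===== LEMMAS AND PROOFS =====

-- the band of divisors not yet counted when B's loop counter is i
def pvT (m i : ℕ) : Finset ℕ := (Nat.divisors m).filter (fun d => i ≤ d ∧ d * i ≤ m)

lemma pvT_one (m : ℕ) : pvT m 1 = Nat.divisors m := by
  apply Finset.filter_true_of_mem
  intro d hd
  rw [Nat.mem_divisors] at hd
  have h1 := Nat.le_of_dvd (Nat.pos_of_ne_zero hd.2) hd.1
  have h0 : 1 ≤ d := Nat.pos_of_dvd_of_pos hd.1 (Nat.pos_of_ne_zero hd.2)
  omega

lemma pvT_empty (m i : ℕ) (h : m < i * i) : pvT m i = ∅ := by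
  apply Finset.filter_false_of_mem
  rintro d - ⟨h1, h2⟩
  nlinarith

lemma pv_band_eq (d i e : ℕ) (hd0 : 0 < d) (hdi : d * i ≤ d * e) (hcon : ¬ d * (i + 1) ≤ d * e) : e = i := by
  have h1 := Nat.le_of_mul_le_mul_left hdi hd0
  have h2 := Nat.lt_of_mul_lt_mul_left (show d * e < d * (i + 1) by omega)
  omega

lemma pvT_step_not_dvd (m i : ℕ) (hi : 1 ≤ i) (_hle : i * i ≤ m) (hnd : ¬ i ∣ m) :
    pvT m i = pvT m (i + 1) := by
  apply Finset.ext
  intro d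
  simp only [pvT, Finset.mem_filter, Nat.mem_divisors]
  constructor
  · rintro ⟨⟨hdvd, hm0⟩, hid, hdi⟩
    obtain ⟨e, he⟩ := hdvd
    have hd0 : 0 < d := by
      rcases Nat.eq_zero_or_pos d with h | h
      · subst h; simp at he; omega
      · exact h
    refine ⟨⟨⟨e, he⟩, hm0⟩, ?_, ?_⟩
    · rcases Nat.eq_or_lt_of_le hid with h | h
      · exact absurd (h ▸ (⟨e, he⟩ : d ∣ m)) hnd
      · omega
    · by_contra hcon
      have : e = i := pv_band_eq d i e hd0 (he ▸ hdi) (he ▸ hcon)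
      exact hnd ⟨d, by rw [he, this, Nat.mul_comm]⟩
  · rintro ⟨⟨hdvd, hm0⟩, hid, hdi⟩
    have := Nat.mul_le_mul (Nat.le_refl d) (show i ≤ i + 1 by omega)
    exact ⟨⟨hdvd, hm0⟩, by omega, by omega⟩

lemma pvT_step_dvd (m i : ℕ) (hi : 1 ≤ i) (hle : i * i ≤ m) (hd : i ∣ m) :
    pvT m i = insert i (insert (m / i) (pvT m (i + 1))) := by
  have hii : 1 ≤ i * i := Nat.mul_le_mul hi hi
  have hm0 : m ≠ 0 := by omega
  apply Finset.ext
  intro d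
  simp only [pvT, Finset.mem_filter, Nat.mem_divisors, Finset.mem_insert]
  constructor
  · rintro ⟨⟨hdvd, _⟩, hid, hdi⟩
    obtain ⟨f, hf⟩ := hdvd
    have hd0 : 0 < d := by
      rcases Nat.eq_zero_or_pos d with h | h
      · subst h; simp at hf; omega
      · exact h
    by_cases h1 : d = i
    · left; exact h1
    by_cases h2 : d = m / i
    · right; left; exact h2
    right; right
    refine ⟨⟨⟨f, hf⟩, hm0⟩, by omega, ?_⟩
    by_contra hcon
    have hfei : f = i := pv_band_eq d i f hd0 (hf ▸ hdi) (hf ▸ hcon)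
    apply h2
    rw [hf, hfei]
    symm
    exact Nat.mul_div_cancel d (by omega)
  · intro hcase
    have hdvdq : m / i ∣ m := Nat.div_dvd_of_dvd hd
    have hmul : m / i * i = m := Nat.div_mul_cancel hd
    rcases hcase with h | h | h
    · subst h
      exact ⟨⟨hd, hm0⟩, le_refl _, hle⟩
    · subst h
      refine ⟨⟨hdvdq, hm0⟩, ?_, by omega⟩
      rw [Nat.le_div_iff_mul_le (by omega)]
      exact hle
    · obtain ⟨⟨hdvd, _⟩, hid, hdi⟩ := h
      have := Nat.mul_le_mul (Nat.le_refl d) (show i ≤ i + 1 by omega)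
      exact ⟨⟨hdvd, hm0⟩, by omega, by omega⟩

lemma pvT_not_mem_i (m i : ℕ) (_hi : 1 ≤ i) : i ∉ pvT m (i + 1) := by
  simp only [pvT, Finset.mem_filter]
  rintro ⟨-, h, -⟩
  omega

lemma pvT_not_mem_div (m i : ℕ) (hi : 1 ≤ i) (hle : i * i ≤ m) (hd : i ∣ m) :
    m / i ∉ pvT m (i + 1) := by
  have hmul : m / i * i = m := Nat.div_mul_cancel hd
  have hq : 1 ≤ m / i := by
    rw [Nat.le_div_iff_mul_le (show 0 < i by omega)]
    have := Nat.mul_le_mul hi (Nat.le_refl i)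
    omega
  simp only [pvT, Finset.mem_filter]
  rintro ⟨-, -, h⟩
  have : m / i * (i + 1) = m + m / i := by rw [Nat.mul_add, hmul, Nat.mul_one]
  omega

-- mod/floordiv on positive casts
lemma pv_mod_zero_iff (m i : ℕ) (hi : 1 ≤ i) :
    (PySem.Int.mod (m : Int) (i : Int) == 0) = true ↔ i ∣ m := by
  rw [PySem.Int.mod_natCast]
  simp [Nat.dvd_iff_mod_eq_zero]
  omega

-- B's loop computes the band sums
lemma pvLoopB_eq (m : ℕ) (i : ℕ) (hi : 1 ≤ i) (s c : Int) :
    pvLoopB (m : Int) (i : Int) s c =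
      (s + ∑ d ∈ pvT m i, (d : Int), c + (pvT m i).card) := by
  by_cases hle : i * i ≤ m
  · rw [pvLoopB]
    have hle' : (i : Int) * (i : Int) ≤ (m : Int) := by exact_mod_cast hle
    rw [dif_pos hle']
    have hcast : ((i : Int) + 1) = ((i + 1 : ℕ) : Int) := by push_cast; ring
    by_cases hd : i ∣ m
    · have hmod : (PySem.Int.mod (m : Int) (i : Int) == 0) = true := (pv_mod_zero_iff m i hi).mpr hd
      have hdivC : PySem.Int.floordiv (m : Int) (i : Int) = ((m / i : ℕ) : Int) :=
        PySem.Int.floordiv_natCast m i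
      rw [pvT_step_dvd m i hi hle hd]
      by_cases hji : m / i = i
      · -- j == i: single insert
        have hji' : PySem.Int.floordiv (m : Int) (i : Int) = (i : Int) := by
          rw [hdivC, hji]
        simp only [hmod, if_true, hdivC]
        rw [if_neg (by simp [hji])]
        rw [hcast, pvLoopB_eq m (i + 1) (by omega) _ _]
        rw [hji, Finset.insert_idem]
        rw [Finset.sum_insert (pvT_not_mem_i m i hi), Finset.card_insert_of_notMem (pvT_not_mem_i m i hi)]
        simp only [Prod.mk.injEq]; constructor <;> push_cast <;> ring
      · have hji' : ((m / i : ℕ) : Int) ≠ (i : Int) := by exact_mod_cast hji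
        simp only [hmod, if_true, hdivC]
        rw [if_pos hji']
        rw [hcast, pvLoopB_eq m (i + 1) (by omega) _ _]
        have h1 : m / i ∉ pvT m (i + 1) := pvT_not_mem_div m i hi hle hd
        have h2 : i ∉ insert (m / i) (pvT m (i + 1)) := by
          simp [Finset.mem_insert, pvT_not_mem_i m i hi]
          omega
        rw [Finset.sum_insert h2, Finset.sum_insert h1,
            Finset.card_insert_of_notMem h2, Finset.card_insert_of_notMem h1]
        simp only [Prod.mk.injEq]; constructor <;> push_cast <;> ring
    · have hmod : (PySem.Int.mod (m : Int) (i : Int) == 0) = false := by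
        rw [Bool.eq_false_iff]
        intro hcon
        exact hd ((pv_mod_zero_iff m i hi).mp hcon)
      simp only [hmod, Bool.false_eq_true, if_false]
      rw [hcast, pvLoopB_eq m (i + 1) (by omega) s c, pvT_step_not_dvd m i hi hle hd]
  · rw [pvLoopB]
    have hle' : ¬ ((i : Int) * (i : Int) ≤ (m : Int)) := by
      intro hcon
      exact hle (by exact_mod_cast hcon)
    rw [dif_neg hle']
    rw [pvT_empty m i (by omega)]
    simp
termination_by (m + 1 - i)
decreasing_by all_goals
  have := Nat.mul_le_mul hi (Nat.le_refl i)
  omega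

-- A's fold appends the filtered prefix
lemma pvFoldA (n : Int) (l : List Int) (res : List Int) (c : Int) :
    l.foldl (fun (st : List Int × Int) i =>
      if PySem.Int.mod n i == 0 then (st.1 ++ [i], st.2 + 1) else st) (res, c) =
    (res ++ l.filter (fun i => PySem.Int.mod n i == 0),
     c + (l.filter (fun i => PySem.Int.mod n i == 0)).length) := by
  induction l generalizing res c with
  | nil => simp
  | cons x xs ih =>
    simp only [List.foldl_cons, List.filter_cons]
    by_cases hx : (PySem.Int.mod n x == 0) = true
    · rw [if_pos hx, ih]
      simp [hx]
      omega
    · rw [if_neg hx, ih]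
      simp [hx]

-- divisors as a filtered list of 1..m
lemma pv_div_sum (m : ℕ) :
    (∑ d ∈ Nat.divisors m, (d : Int)) =
      (List.map (fun d : ℕ => (d : Int)) ((List.range' 1 m).filter (fun d => decide (d ∣ m)))).sum := by
  rw [Nat.divisors, Nat.Ico_eq_range']
  simp only [Nat.add_sub_cancel]
  rw [Finset.sum]
  rw [Finset.filter_val]
  simp [Multiset.filter_coe, Multiset.map_coe, Multiset.sum_coe]

lemma pv_div_card (m : ℕ) :
    ((Nat.divisors m).card : Int) =
      (((List.range' 1 m).filter (fun d => decide (d ∣ m))).length : Int) := by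
  rw [Nat.divisors, Nat.Ico_eq_range']
  simp only [Nat.add_sub_cancel]
  rw [Finset.card, Finset.filter_val]
  simp [Multiset.filter_coe]

-- the cast range list
lemma pv_pyRange_cast (m : ℕ) :
    PySem.List.pyRange 1 ((m : Int) + 1) 1 = List.map (fun k : ℕ => (k : Int)) (List.range' 1 m) := by
  induction m with
  | zero => simp [PySem.List.pyRange_one_eq_nil]
  | succ k ih =>
    have h1 : (1 : Int) ≤ (k : Int) + 1 := by omega
    have : ((k + 1 : ℕ) : Int) + 1 = ((k : Int) + 1) + 1 := by push_cast; ring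
    rw [this, PySem.List.pyRange_one_succ_right h1, ih, List.range'_1_concat]
    simp
    omega

theorem find_sum_and_num_factors_spec : Claim_equal_find_sum_and_num_factors := by
  intro n _
  unfold Spec_find_sum_and_num_factors
  by_cases hn : n ≤ 0
  · -- both trivial
    unfold find_sum_and_num_factors find_sum_and_num_factors_alt
    rw [PySem.List.pyRange_one_eq_nil (by omega)]
    rw [pvLoopB]
    rw [dif_neg (by nlinarith)]
    simp
  · obtain ⟨m, rfl⟩ : ∃ m : ℕ, n = (m : Int) := ⟨n.toNat, by omega⟩
    have hm : 1 ≤ m := by omega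
    unfold find_sum_and_num_factors find_sum_and_num_factors_alt
    have hB := pvLoopB_eq m 1 (by omega) 0 0
    rw [show ((1 : ℕ) : Int) = (1 : Int) by norm_num] at hB
    rw [hB, pvT_one]
    rw [pv_pyRange_cast m, pvFoldA]
    simp only [List.nil_append, zero_add]
    rw [List.filter_map]
    have hpred : ∀ k ∈ List.range' 1 m,
        ((fun i => PySem.Int.mod (m : Int) i == 0) ∘ (fun k : ℕ => (k : Int))) k
          = decide (k ∣ m) := by
      intro k hk
      rw [List.mem_range'_1] at hk
      simp only [Function.comp]
      have hiff := pv_mod_zero_iff m k (by omega)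
      by_cases hd : k ∣ m
      · rw [hiff.mpr hd]
        simp [hd]
      · have hf : (PySem.Int.mod (m : Int) (k : Int) == 0) = false := by
          rw [Bool.eq_false_iff]
          intro hc
          exact hd (hiff.mp hc)
        rw [hf]
        simp [hd]
    rw [List.filter_congr hpred]
    simp only [Prod.mk.injEq]
    constructor
    · rw [pv_div_sum m]
    · rw [List.length_map, pv_div_card m]
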